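-- pv_equiv track=rewrite | github.com/jamesben6688/coding | dfs/keyboard_string.py | can_type_word
-- ===== SOURCE A (Python) =====
-- from collections import defaultdict
--
-- def can_type_word(keyboard, k, word):
--     m, n = len(keyboard), len(keyboard[0])
--
--     # Step 1: 构建每个字符的所有可能位置
--     char_positions = defaultdict(list)
--     for i in range(m):
--         for j in range(n):
--             char_positions[keyboard[i][j]].append((i, j))
--
--     # Step 2: 初始化起点（第一个字符的所有位置）
--     if word[0] not in char_positions:
--         return False
--     current_positions = char_positions[word[0]]
--
--     # Step 3: 对于每个字符，从上一次可达的位置出发，找出下一个可达的位置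
--     for idx in range(1, len(word)):
--         target_char = word[idx]
--         if target_char not in char_positions:
--             return False
--
--         next_positions = []
--         for (x1, y1) in current_positions:
--             for (x2, y2) in char_positions[target_char]:
--                 if abs(x1 - x2) + abs(y1 - y2) <= k:
--                     next_positions.append((x2, y2))
--
--         if not next_positions:
--             return False  # 没有任何合法的跳跃路径
--
--         current_positions = next_positions  # 进入下一轮
--
--     return True
-- ===== SOURCE B (Python) =====
-- def can_type_word(keyboard, k, word):
--     m, n = len(keyboard), len(keyboard[0])
--     pos = {}
--     for i in range(m):
--         row = keyboard[i]
--         for j in range(n):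
--             pos.setdefault(row[j], []).append((i, j))
--     # backward DP over the word, starting from its last character:
--     # ok = the positions of the current character from which the rest of the
--     # word can be typed; duplicates never accumulate, unlike a forward frontier.
--     rev = word[::-1]
--     ok = pos.get(rev[0], [])
--     for ch in rev[1:]:
--         ok = [p for p in pos.get(ch, [])
--               if any(abs(p[0] - q[0]) + abs(p[1] - q[1]) <= k for q in ok)]
--     return bool(ok)
-- ===== Notes on version B (the rewrite author's own statement) =====
-- stated objective: alternative
-- what changed: Replaced A's forward frontier expansion (which appends one target position per (source,target) pair, so the frontier list can grow multiplicatively with duplicates) by a backward DP over the word that keeps, for each character, the duplicate-free sublist of its keyboard positions from which the remaining suffix can be typed.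
import Mathlib
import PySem

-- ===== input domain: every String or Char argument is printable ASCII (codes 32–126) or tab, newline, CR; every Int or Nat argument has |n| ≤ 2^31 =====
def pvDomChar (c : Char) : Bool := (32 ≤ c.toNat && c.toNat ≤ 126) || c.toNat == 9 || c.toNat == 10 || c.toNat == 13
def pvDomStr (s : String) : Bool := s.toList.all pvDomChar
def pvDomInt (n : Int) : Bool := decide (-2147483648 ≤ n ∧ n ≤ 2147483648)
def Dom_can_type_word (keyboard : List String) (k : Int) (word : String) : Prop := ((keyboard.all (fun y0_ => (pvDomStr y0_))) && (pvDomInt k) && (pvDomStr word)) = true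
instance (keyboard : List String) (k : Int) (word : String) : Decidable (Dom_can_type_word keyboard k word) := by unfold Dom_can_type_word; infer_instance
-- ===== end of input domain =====

-- B replaces A's forward frontier expansion (which appends one target per (source, target)
-- pair and can accumulate duplicates) by a backward DP over the word that keeps, per
-- character, the duplicate-free sublist of its positions from which the suffix is typable.


-- ===== PORT A =====
-- char_positions build: for i in range(m): for j in range(n): char_positions[keyboard[i][j]].append((i,j))
-- (defaultdict(list) access-and-append = Dict.modify with default []; i,j are in range under
-- Pre_, so the total getD indexing is exact there)
def pvBuildA (keyboard : List String) (m n : Nat) : PySem.Dict Char (List (Int × Int)) :=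
  (List.range m).foldl (fun d i =>
    (List.range n).foldl (fun d j =>
      d.modify ((keyboard.getD i "").toList.getD j ' ') [] (· ++ [((i : Int), (j : Int))])) d)
    PySem.Dict.empty

-- the "for idx in range(1, len(word))" loop, as structural recursion over word[1:],
-- carrying current_positions
def pvLoopA (cp : PySem.Dict Char (List (Int × Int))) (k : Int) :
    List Char → List (Int × Int) → Bool
  | [], _ => true
  | c :: rest, cur =>
      if cp.contains c = false then false
      else
        let tps := cp.getD c []
        -- for (x1,y1) in current_positions: for (x2,y2) in char_positions[target]: if dist ≤ k: append
        let nxt := cur.foldl (fun acc p =>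
          tps.foldl (fun acc q =>
            if |p.1 - q.1| + |p.2 - q.2| ≤ k then acc ++ [q] else acc) acc) []
        if nxt = [] then false
        else pvLoopA cp k rest nxt

def can_type_word (keyboard : List String) (k : Int) (word : String) : Bool :=
  let m := keyboard.length
  let n := (keyboard.headD "").toList.length   -- len(keyboard[0]); keyboard ≠ [] by Pre_
  let char_positions := pvBuildA keyboard m n
  match word.toList with
  | [] => false   -- unreachable: word[0] raises IndexError, excluded by Pre_
  | c0 :: rest =>
      if char_positions.contains c0 = false then false
      else pvLoopA char_positions k rest (char_positions.getD c0 [])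

-- ===== PORT B =====
-- pos.setdefault(row[j], []).append((i,j)) = Dict.modify with default []
def pvBuildB (keyboard : List String) (m n : Nat) : PySem.Dict Char (List (Int × Int)) :=
  (List.range m).foldl (fun d i =>
    let row := (keyboard.getD i "").toList
    (List.range n).foldl (fun d j =>
      d.modify (row.getD j ' ') [] (· ++ [((i : Int), (j : Int))])) d)
    PySem.Dict.empty

-- ok = [p for p in pos.get(ch, []) if any(abs(p[0]-q[0])+abs(p[1]-q[1]) <= k for q in ok)]
def pvStepB (pos : PySem.Dict Char (List (Int × Int))) (k : Int)
    (ok : List (Int × Int)) (ch : Char) : List (Int × Int) :=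
  (pos.getD ch []).filter (fun p =>
    ok.any (fun q => decide (|p.1 - q.1| + |p.2 - q.2| ≤ k)))

def can_type_word_alt (keyboard : List String) (k : Int) (word : String) : Bool :=
  let m := keyboard.length
  let n := (keyboard.headD "").toList.length
  let pos := pvBuildB keyboard m n
  let rev := (PySem.Str.slice? word none none (-1)).getD ""   -- word[::-1]
  match rev.toList with
  | [] => false   -- unreachable: rev[0] raises IndexError, excluded by Pre_
  | r0 :: rest =>
      !(rest.foldl (pvStepB pos k) (pos.getD r0 [])).isEmpty   -- bool(ok)

-- ===== PRECONDITION & SPEC =====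
-- Pre_ excludes exactly the inputs where A raises IndexError: empty keyboard (keyboard[0]),
-- empty word (word[0]), and a row shorter than row 0 (keyboard[i][j], j < len(keyboard[0])).
def Pre_can_type_word (keyboard : List String) (k : Int) (word : String) : Prop :=
  keyboard ≠ [] ∧ word.toList ≠ [] ∧
    ∀ s ∈ keyboard, (keyboard.headD "").toList.length ≤ s.toList.length
instance (keyboard : List String) (k : Int) (word : String) :
    Decidable (Pre_can_type_word keyboard k word) := by unfold Pre_can_type_word; infer_instance

def pvWitness_can_type_word : List String × Int × String := (["ab", "cd"], 1, "abc")

def Spec_can_type_word (keyboard : List String) (k : Int) (word : String) (out : Bool) : Prop := out = can_type_word_alt keyboard k word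
instance (keyboard : List String) (k : Int) (word : String) (out : Bool) : Decidable (Spec_can_type_word keyboard k word out) := by unfold Spec_can_type_word; infer_instance

-- ===== CLAIM (what is proved, stated in full; the proofs are below) =====
def Claim_equal_can_type_word : Prop := ∀ (keyboard : List String) (k : Int) (word : String), Dom_can_type_word keyboard k word → Pre_can_type_word keyboard k word → Spec_can_type_word keyboard k word (can_type_word keyboard k word)

-- ===== LEMMAS AND PROOFS =====

-- "from position p one can type the whole suffix cs" — the semantic core of both loops
def pvGood (cp : PySem.Dict Char (List (Int × Int))) (k : Int) :
    List Char → Int × Int → Bool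
  | [], _ => true
  | c :: cs, p => (cp.getD c []).any
      (fun q => decide (|p.1 - q.1| + |p.2 - q.2| ≤ k) && pvGood cp k cs q)

@[simp] theorem pvGood_nil (cp : PySem.Dict Char (List (Int × Int))) (k : Int) (p : Int × Int) :
    pvGood cp k [] p = true := rfl

theorem pvGood_cons (cp : PySem.Dict Char (List (Int × Int))) (k : Int) (c : Char)
    (cs : List Char) (p : Int × Int) :
    pvGood cp k (c :: cs) p = (cp.getD c []).any
      (fun q => decide (|p.1 - q.1| + |p.2 - q.2| ≤ k) && pvGood cp k cs q) := rfl

-- the two builds are the same dictionary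
theorem pvBuildB_eq_pvBuildA (keyboard : List String) (m n : Nat) :
    pvBuildB keyboard m n = pvBuildA keyboard m n := rfl

-- the flattened (char, position) pair list the build folds over
def pvPairs (keyboard : List String) (m n : Nat) : List (Char × (Int × Int)) :=
  (List.range m).flatMap (fun i =>
    (List.range n).map (fun j => ((keyboard.getD i "").toList.getD j ' ', ((i : Int), (j : Int)))))

theorem pvBuildA_eq_foldl_pairs (keyboard : List String) (m n : Nat) :
    pvBuildA keyboard m n
      = (pvPairs keyboard m n).foldl (fun d p => d.modify p.1 [] (· ++ [p.2]))
          PySem.Dict.empty := by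
  simp [pvBuildA, pvPairs, List.foldl_flatMap, List.foldl_map]

theorem pvGetD_buildA (keyboard : List String) (m n : Nat) (c : Char) :
    (pvBuildA keyboard m n).getD c []
      = ((pvPairs keyboard m n).filter (fun p => p.1 == c)).map (·.2) := by
  rw [pvBuildA_eq_foldl_pairs]
  simp [PySem.Dict.getD_foldl_modify_append, PySem.Dict.getD_empty]

theorem pvContains_foldl_modify (l : List (Char × (Int × Int)))
    (d : PySem.Dict Char (List (Int × Int))) (c : Char) :
    (l.foldl (fun d p => d.modify p.1 [] (· ++ [p.2])) d).contains c
      = (d.contains c || l.any (fun p => p.1 == c)) := by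
  induction l generalizing d with
  | nil => simp
  | cons p ps ih =>
      simp only [List.foldl_cons, ih, PySem.Dict.contains_modify, List.any_cons]
      cases h : (c == p.1) <;> cases hd : d.contains c <;> simp_all [BEq.comm]

-- if the built dict contains c, its value list is nonempty
theorem pvGetD_ne_nil_of_contains (keyboard : List String) (m n : Nat) (c : Char)
    (h : (pvBuildA keyboard m n).contains c = true) :
    (pvBuildA keyboard m n).getD c [] ≠ [] := by
  rw [pvBuildA_eq_foldl_pairs] at h
  rw [pvContains_foldl_modify, PySem.Dict.contains_empty, Bool.false_or,
      List.any_eq_true] at h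
  obtain ⟨p, hp, hpc⟩ := h
  rw [pvGetD_buildA]
  simp only [ne_eq, List.map_eq_nil_iff, List.filter_eq_nil_iff]
  exact fun hall => (hall p hp) hpc

-- A's inner double loop builds exactly the flatMap of filters
theorem pvNxt_eq (tps cur : List (Int × Int)) (k : Int) :
    cur.foldl (fun acc p =>
        tps.foldl (fun acc q =>
          if |p.1 - q.1| + |p.2 - q.2| ≤ k then acc ++ [q] else acc) acc) []
      = cur.flatMap (fun p =>
          tps.filter (fun q => decide (|p.1 - q.1| + |p.2 - q.2| ≤ k))) := by
  have hin : ∀ (p : Int × Int) (acc : List (Int × Int)),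
      tps.foldl (fun acc q =>
          if |p.1 - q.1| + |p.2 - q.2| ≤ k then acc ++ [q] else acc) acc
        = acc ++ tps.filter (fun q => decide (|p.1 - q.1| + |p.2 - q.2| ≤ k)) := by
    intro p acc
    simpa using PySem.List.foldl_append_if
      (fun q : Int × Int => decide (|p.1 - q.1| + |p.2 - q.2| ≤ k)) (fun q => q) tps acc
  calc cur.foldl (fun acc p =>
          tps.foldl (fun acc q =>
            if |p.1 - q.1| + |p.2 - q.2| ≤ k then acc ++ [q] else acc) acc) []
      = cur.foldl (fun acc p =>
          acc ++ tps.filter (fun q => decide (|p.1 - q.1| + |p.2 - q.2| ≤ k))) [] := by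
        exact PySem.List.foldl_congr_mem cur _ _ [] (fun acc p _ => hin p acc)
    _ = _ := by rw [PySem.List.foldl_append_eq_flatMap]; simp

-- A's loop computes "some current position can type the rest"
theorem pvLoopA_eq_any (cp : PySem.Dict Char (List (Int × Int))) (k : Int)
    (hc : ∀ c, cp.contains c = false → cp.getD c [] = []) :
    ∀ (cs : List Char) (cur : List (Int × Int)), cur ≠ [] →
      pvLoopA cp k cs cur = cur.any (pvGood cp k cs) := by
  intro cs
  induction cs with
  | nil =>
      intro cur hcur
      cases cur with
      | nil => exact absurd rfl hcur
      | cons p ps => simp [pvLoopA]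
  | cons c rest ih =>
      intro cur hcur
      rw [pvLoopA]
      by_cases hcc : cp.contains c = false
      · simp [hcc, pvGood_cons, hc c hcc]
      · simp only [hcc, if_false]
        rw [pvNxt_eq]
        set nxt := cur.flatMap (fun p =>
          (cp.getD c []).filter (fun q => decide (|p.1 - q.1| + |p.2 - q.2| ≤ k))) with hnxt
        have hkey : nxt.any (pvGood cp k rest) = cur.any (pvGood cp k (c :: rest)) := by
          rw [hnxt]
          simp only [List.any_flatMap, List.any_filter]
          exact List.any_congr rfl (fun p => (pvGood_cons cp k c rest p).symm)
        by_cases hne : nxt = []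
        · rw [if_pos hne, ← hkey, hne]
          simp
        · rw [if_neg hne, ih nxt hne, hkey]
          simp

-- B's one step turns the filtered positions of c into the filtered positions of r
theorem pvStepB_filter (cp : PySem.Dict Char (List (Int × Int))) (k : Int)
    (r c : Char) (S : List Char) :
    pvStepB cp k ((cp.getD c []).filter (pvGood cp k S)) r
      = (cp.getD r []).filter (pvGood cp k (c :: S)) := by
  unfold pvStepB
  apply List.filter_congr
  intro p _
  rw [List.any_filter, pvGood_cons]
  exact List.any_congr rfl (fun q => by rw [Bool.and_comm])

-- the value of B's fold after consuming the reversed word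
def pvListF (cp : PySem.Dict Char (List (Int × Int))) (k : Int) :
    List Char → List (Int × Int)
  | [] => []
  | c :: S => (cp.getD c []).filter (pvGood cp k S)

theorem pvFoldB_eq (cp : PySem.Dict Char (List (Int × Int))) (k : Int) :
    ∀ (rest : List Char) (c : Char) (S : List Char),
      rest.foldl (pvStepB cp k) ((cp.getD c []).filter (pvGood cp k S))
        = pvListF cp k (rest.reverse ++ c :: S) := by
  intro rest
  induction rest with
  | nil => intro c S; simp [pvListF]
  | cons r rs ih =>
      intro c S
      rw [List.foldl_cons, pvStepB_filter, ih r (c :: S)]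
      simp

-- both sides equal the canonical value
theorem pvA_eq_target (keyboard : List String) (k : Int) (word : String)
    (h : word.toList ≠ []) :
    can_type_word keyboard k word
      = ((pvBuildA keyboard keyboard.length (keyboard.headD "").toList.length).getD
            (word.toList.headD ' ') []).any
          (pvGood (pvBuildA keyboard keyboard.length (keyboard.headD "").toList.length) k
            word.toList.tail) := by
  obtain ⟨c0, rest, hw⟩ := List.exists_cons_of_ne_nil h
  set cp := pvBuildA keyboard keyboard.length (keyboard.headD "").toList.length with hcp
  have hc : ∀ c, cp.contains c = false → cp.getD c [] = [] :=
    fun c hn => PySem.Dict.getD_of_not_contains cp [] hn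
  rw [can_type_word, hw]
  simp only [← hcp]
  by_cases hcc : cp.contains c0 = false
  · simp [hcc, hc c0 hcc]
  · simp only [hcc]
    have hne : cp.getD c0 [] ≠ [] := by
      rw [hcp]
      exact pvGetD_ne_nil_of_contains keyboard _ _ c0
        (by rw [← hcp]; exact Bool.not_eq_false _ ▸ eq_true_of_ne_false hcc)
    rw [pvLoopA_eq_any cp k hc rest _ hne]
    simp

theorem pvNotIsEmpty_filter {α : Type} (l : List α) (p : α → Bool) :
    (!(l.filter p).isEmpty) = l.any p := by
  induction l with
  | nil => rfl
  | cons a l ih => by_cases h : p a = true <;> simp [h, ih]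

theorem pvB_eq_target (keyboard : List String) (k : Int) (word : String)
    (h : word.toList ≠ []) :
    can_type_word_alt keyboard k word
      = ((pvBuildA keyboard keyboard.length (keyboard.headD "").toList.length).getD
            (word.toList.headD ' ') []).any
          (pvGood (pvBuildA keyboard keyboard.length (keyboard.headD "").toList.length) k
            word.toList.tail) := by
  obtain ⟨c0, rest, hw⟩ := List.exists_cons_of_ne_nil h
  set cp := pvBuildA keyboard keyboard.length (keyboard.headD "").toList.length with hcp
  have hrev : word.toList.reverse ≠ [] := by simp [hw]
  obtain ⟨r0, rrest, hr⟩ := List.exists_cons_of_ne_nil hrev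
  rw [can_type_word_alt]
  simp only [PySem.Str.slice?_none_none_neg_one, Option.getD_some, pvBuildB_eq_pvBuildA,
    ← hcp]
  rw [show (String.ofList word.toList.reverse).toList = word.toList.reverse by simp, hr]
  show (!(List.foldl (pvStepB cp k) (cp.getD r0 []) rrest).isEmpty)
      = (cp.getD (word.toList.headD ' ') []).any (pvGood cp k word.toList.tail)
  have hinit : cp.getD r0 [] = (cp.getD r0 []).filter (pvGood cp k []) :=
    (List.filter_eq_self.mpr (fun p _ => pvGood_nil cp k p)).symm
  rw [hinit, pvFoldB_eq cp k rrest r0 []]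
  have : rrest.reverse ++ [r0] = word.toList := by
    rw [← List.reverse_cons, ← hr, List.reverse_reverse]
  rw [this, hw]
  simp only [pvListF]
  rw [pvNotIsEmpty_filter]
  simp

-- ===== VERDICT (by name: the statement is the Claim_ definition above) =====
theorem can_type_word_spec : Claim_equal_can_type_word := by
  intro keyboard k word _ hpre
  unfold Spec_can_type_word
  rw [pvA_eq_target keyboard k word hpre.2.1, pvB_eq_target keyboard k word hpre.2.1]
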